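-- pv_equiv track=rewrite | github.com/LeJin27/ELeetCode | Easy/11_Sudoku_Validator/main.py | squareIsValid
-- ===== SOURCE A (Python) =====
-- def squareIsValid(board: list[list[str]], rowIndex, columnIndex) -> bool:
--   rowDict = {}
--
--   for _, row in enumerate(board[rowIndex:rowIndex+3], start=rowIndex):
--     for _, key in enumerate(row[columnIndex: columnIndex+3], start=columnIndex):
--       if key != ".":
--         if (key not in rowDict):
--           rowDict[key] = True
--         else:
--           return False
--   return True
-- ===== SOURCE B (Python) =====
-- def squareIsValid(board: list[list[str]], rowIndex, columnIndex) -> bool: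
--     vals = sorted(v
--                   for row in board[rowIndex:rowIndex + 3]
--                   for v in row[columnIndex:columnIndex + 3]
--                   if v != ".")
--     return all(a != b for a, b in zip(vals, vals[1:]))
-- ===== Notes on version B (the rewrite author's own statement) =====
-- stated objective: alternative
-- what changed: Duplicate detection by sorting: gather the non-'.' region cells, sort them, and verify no two adjacent sorted values are equal, instead of A's incremental seen-dict with early return.
import Mathlib
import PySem

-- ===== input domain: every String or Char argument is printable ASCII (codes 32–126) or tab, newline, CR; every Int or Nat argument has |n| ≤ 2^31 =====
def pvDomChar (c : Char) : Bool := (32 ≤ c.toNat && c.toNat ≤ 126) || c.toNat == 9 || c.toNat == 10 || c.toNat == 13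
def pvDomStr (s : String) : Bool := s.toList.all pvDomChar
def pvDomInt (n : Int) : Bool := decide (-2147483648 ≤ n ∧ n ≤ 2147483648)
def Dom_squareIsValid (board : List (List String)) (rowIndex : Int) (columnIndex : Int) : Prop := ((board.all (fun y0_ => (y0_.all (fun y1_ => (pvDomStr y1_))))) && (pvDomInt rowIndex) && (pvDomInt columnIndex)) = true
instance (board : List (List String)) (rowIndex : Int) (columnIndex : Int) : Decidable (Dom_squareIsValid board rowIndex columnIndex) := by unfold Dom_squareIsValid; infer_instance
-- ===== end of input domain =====

-- B detects duplicates by a different algorithm: sort the gathered non-'.' region cells and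
-- scan adjacent sorted pairs for equality, instead of A's incremental seen-dict with early return.

-- ===== PORT A =====
-- inner 'for key in row[columnIndex:columnIndex+3]' loop; 'none' models 'return False'
def sqInner (row : List String) (d : PySem.Dict String Bool) :
    Option (PySem.Dict String Bool) :=
  match row with
  | [] => some d
  | key :: rest =>
    if key ≠ "." then
      if d.contains key = false then sqInner rest (d.insert key true)
      else none
    else sqInner rest d

-- outer 'for row in board[rowIndex:rowIndex+3]' loop
def sqOuter (rows : List (List String)) (columnIndex : Int) (d : PySem.Dict String Bool) : Bool :=
  match rows with
  | [] => true
  | row :: rest =>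
    match sqInner (PySem.List.slice row (some columnIndex) (some (columnIndex + 3))) d with
    | none => false
    | some d' => sqOuter rest columnIndex d'

def squareIsValid (board : List (List String)) (rowIndex : Int) (columnIndex : Int) : Bool :=
  sqOuter (PySem.List.slice board (some rowIndex) (some (rowIndex + 3))) columnIndex PySem.Dict.empty

-- ===== PORT B =====
-- the generator: all non-'.' cells of the 3x3 region
def gatherVals (board : List (List String)) (rowIndex : Int) (columnIndex : Int) : List String :=
  (PySem.List.slice board (some rowIndex) (some (rowIndex + 3))).flatMap
    (fun row => (PySem.List.slice row (some columnIndex) (some (columnIndex + 3))).filter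
      (fun v => v ≠ "."))

-- 'all(a != b for a, b in zip(vals, vals[1:]))': scan adjacent pairs
def adjDistinct : List String → Bool
  | a :: b :: t => a ≠ b && adjDistinct (b :: t)
  | _ => true

def squareIsValid_alt (board : List (List String)) (rowIndex : Int) (columnIndex : Int) : Bool :=
  adjDistinct (PySem.List.sorted (gatherVals board rowIndex columnIndex) (fun x => x) false)

-- ===== PRECONDITION & SPEC =====
def Spec_squareIsValid (board : List (List String)) (rowIndex : Int) (columnIndex : Int) (out : Bool) : Prop := out = squareIsValid_alt board rowIndex columnIndex
instance (board : List (List String)) (rowIndex : Int) (columnIndex : Int) (out : Bool) : Decidable (Spec_squareIsValid board rowIndex columnIndex out) := by unfold Spec_squareIsValid; infer_instance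

-- ===== CLAIM (what is proved, stated in full; the proofs are below) =====
def Claim_equal_squareIsValid : Prop := ∀ (board : List (List String)) (rowIndex : Int) (columnIndex : Int), Dom_squareIsValid board rowIndex columnIndex → Spec_squareIsValid board rowIndex columnIndex (squareIsValid board rowIndex columnIndex)

-- ===== LEMMAS AND PROOFS =====

-- If the filtered row is duplicate-free and disjoint from d, sqInner returns the updated dict.
lemma sqInner_some (row : List String) (d : PySem.Dict String Bool)
    (hnd : (row.filter (fun v => v ≠ ".")).Nodup)
    (hdis : ∀ k ∈ row.filter (fun v => v ≠ "."), d.contains k = false) :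
    ∃ d', sqInner row d = some d' ∧
      ∀ k, d'.contains k = (d.contains k || decide (k ∈ row.filter (fun v => v ≠ "."))) := by
  induction row generalizing d with
  | nil => exact ⟨d, rfl, by simp⟩
  | cons key rest ih =>
    by_cases hk : key = "."
    · have hfc : (key :: rest).filter (fun v => v ≠ ".") = rest.filter (fun v => v ≠ ".") :=
        List.filter_cons_of_neg (by simp [hk])
      rw [hfc] at hnd hdis
      obtain ⟨d', h1, h2⟩ := ih d hnd hdis
      exact ⟨d', by simp [sqInner, hk, h1], fun k => by rw [hfc]; exact h2 k⟩
    · have hfc : (key :: rest).filter (fun v => v ≠ ".") = key :: rest.filter (fun v => v ≠ ".") :=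
        List.filter_cons_of_pos (by simp [hk])
      rw [hfc] at hnd hdis
      have hkd : d.contains key = false := hdis key (by simp)
      have hnd' : (rest.filter (fun v => v ≠ ".")).Nodup := hnd.of_cons
      have hkmem : key ∉ rest.filter (fun v => v ≠ ".") := (List.nodup_cons.mp hnd).1
      have hdis' : ∀ k ∈ rest.filter (fun v => v ≠ "."), (d.insert key true).contains k = false := by
        intro k hkmem'
        rw [PySem.Dict.contains_insert]
        have hne : k ≠ key := fun h => hkmem (h ▸ hkmem')
        simp [hne, hdis k (List.mem_cons_of_mem _ hkmem')]
      obtain ⟨d', h1, h2⟩ := ih (d.insert key true) hnd' hdis'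
      refine ⟨d', by simp [sqInner, hk, hkd, h1], fun k => ?_⟩
      rw [h2 k, PySem.Dict.contains_insert, hfc]
      by_cases hke : k = key
      · subst hke; simp [hkd]
      · simp [hke, Bool.or_assoc]

-- If the filtered row has a duplicate or meets d, sqInner returns none.
lemma sqInner_none (row : List String) (d : PySem.Dict String Bool)
    (h : ¬ ((row.filter (fun v => v ≠ ".")).Nodup ∧
            ∀ k ∈ row.filter (fun v => v ≠ "."), d.contains k = false)) :
    sqInner row d = none := by
  induction row generalizing d with
  | nil => simp at h
  | cons key rest ih =>
    by_cases hk : key = "."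
    · have hfc : (key :: rest).filter (fun v => v ≠ ".") = rest.filter (fun v => v ≠ ".") :=
        List.filter_cons_of_neg (by simp [hk])
      rw [hfc] at h
      simp [sqInner, hk, ih d h]
    · have hfc : (key :: rest).filter (fun v => v ≠ ".") = key :: rest.filter (fun v => v ≠ ".") :=
        List.filter_cons_of_pos (by simp [hk])
      rw [hfc] at h
      by_cases hkd : d.contains key = false
      · simp only [sqInner, ne_eq, hk, not_false_eq_true, if_true, hkd, if_true]
        apply ih
        intro ⟨hnd', hdis'⟩
        apply h
        constructor
        · rw [List.nodup_cons]
          refine ⟨fun hmem => ?_, hnd'⟩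
          have := hdis' key hmem
          rw [PySem.Dict.contains_insert] at this
          simp at this
        · intro k hkmem
          rcases List.mem_cons.mp hkmem with h1 | h1
          · exact h1 ▸ hkd
          · have := hdis' k h1
            rw [PySem.Dict.contains_insert] at this
            cases hdk : d.contains k with
            | false => rfl
            | true => rw [hdk] at this; simp at this
      · simp only [Bool.not_eq_false] at hkd
        simp [sqInner, hk, hkd]

-- The outer loop returns true iff all filtered cells are distinct and disjoint from d.
lemma sqOuter_eq (rows : List (List String)) (c : Int) (d : PySem.Dict String Bool) :
    sqOuter rows c d = true ↔
      ((rows.flatMap (fun row =>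
          (PySem.List.slice row (some c) (some (c + 3))).filter (fun v => v ≠ "."))).Nodup ∧
        ∀ k ∈ rows.flatMap (fun row =>
          (PySem.List.slice row (some c) (some (c + 3))).filter (fun v => v ≠ ".")),
          d.contains k = false) := by
  induction rows generalizing d with
  | nil => simp [sqOuter]
  | cons row rest ih =>
    set fr := (PySem.List.slice row (some c) (some (c + 3))).filter (fun v => v ≠ ".") with hfr
    by_cases hrow : fr.Nodup ∧ ∀ k ∈ fr, d.contains k = false
    · obtain ⟨d', h1, h2⟩ := sqInner_some _ d hrow.1 hrow.2
      simp only [sqOuter, h1]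
      rw [ih d']
      simp only [List.flatMap_cons, List.nodup_append, List.mem_append]
      constructor
      · intro ⟨hnd, hall⟩
        refine ⟨⟨hrow.1, hnd, fun a ha b hb hab => ?_⟩, fun k hk => ?_⟩
        · have := hall b hb
          rw [h2 b] at this
          simp only [Bool.or_eq_false_iff, decide_eq_false_iff_not] at this
          exact this.2 (hab ▸ ha)
        · rcases hk with hk | hk
          · exact hrow.2 k hk
          · have := hall k hk
            rw [h2 k] at this
            simp only [Bool.or_eq_false_iff] at this
            exact this.1
      · intro ⟨⟨h1', h2', h3'⟩, hall⟩
        refine ⟨h2', fun k hk => ?_⟩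
        rw [h2 k]
        simp only [Bool.or_eq_false_iff, decide_eq_false_iff_not]
        exact ⟨hall k (Or.inr hk), fun hmem => h3' k hmem k hk rfl⟩
    · simp only [sqOuter, sqInner_none _ d hrow]
      simp only [List.flatMap_cons, List.nodup_append, List.mem_append]
      constructor
      · intro hfalse; exact absurd hfalse (by simp)
      · intro ⟨⟨ha, hb, hc⟩, hall⟩
        exact absurd ⟨ha, fun k hk => hall k (Or.inl hk)⟩ hrow

-- the adjacent scan is the chain of ≠ over consecutive elements
lemma adjDistinct_iff_chain (l : List String) :
    adjDistinct l = true ↔ l.IsChain (· ≠ ·) := by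
  induction l with
  | nil => simp [adjDistinct]
  | cons a t ih =>
    cases t with
    | nil => simp [adjDistinct]
    | cons b t' =>
      rw [List.isChain_cons_cons]
      simp only [adjDistinct, Bool.and_eq_true, ne_eq, decide_eq_true_eq]
      exact and_congr Iff.rfl ih

-- on a ≤-sorted list, adjacent distinctness is exactly Nodup
lemma chain_ne_iff_nodup_of_sorted (l : List String) :
    l.Pairwise (· ≤ ·) → (l.IsChain (· ≠ ·) ↔ l.Nodup) := by
  induction l with
  | nil => intro _; simp
  | cons a t ih =>
    intro hs
    have hst := hs.of_cons
    constructor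
    · intro hc
      rw [List.nodup_cons]
      cases t with
      | nil => simp
      | cons b t' =>
        rcases List.isChain_cons_cons.mp hc with ⟨hab, htail⟩
        refine ⟨?_, (ih hst).mp htail⟩
        intro hmem
        have haleb : a ≤ b := (List.pairwise_cons.mp hs).1 b (by simp)
        have haltb : a < b := lt_of_le_of_ne haleb hab
        rcases List.mem_cons.mp hmem with h | h
        · exact hab h
        · have hble : b ≤ a := (List.pairwise_cons.mp hst).1 a h
          exact absurd (lt_of_lt_of_le haltb hble) (lt_irrefl a)
    · intro hnd
      exact hnd.isChain

-- ===== VERDICT (by name: the statement is the Claim_ definition above) =====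
theorem squareIsValid_spec : Claim_equal_squareIsValid := by
  intro board rowIndex columnIndex _
  unfold Spec_squareIsValid squareIsValid squareIsValid_alt
  rw [Bool.eq_iff_iff, sqOuter_eq, adjDistinct_iff_chain,
    chain_ne_iff_nodup_of_sorted _ (PySem.List.sorted_pairwise _ _),
    (PySem.List.sorted_perm _ _ _).nodup_iff]
  simp only [PySem.Dict.contains_empty, implies_true, and_true]
  exact Iff.rfl
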